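-- pv_equiv track=rewrite | github.com/pypi-data/pypi-mirror-326 | packages/iam-actions/iam_actions-1.2.99999-py3-none-any.whl/iam_actions/generate/resource_type.py | resource_type_arn_to_globs
-- ===== SOURCE A (Python) =====
-- def resource_type_arn_to_globs(arn):
--     out = []
--     in_replacement = False
--     for c in arn:
--         if in_replacement:
--             if c == "}":
--                 in_replacement = False
--         elif c == "$":
--             out.append("*")
--             in_replacement = True
--         else:
--             out.append(c)
--     return "".join(out)
-- ===== SOURCE B (Python) =====
-- def resource_type_arn_to_globs(arn):
--     pieces = []
--     s = arn
--     while True: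
--         j = s.find("$")
--         if j < 0:
--             pieces.append(s)
--             break
--         pieces.append(s[:j])
--         pieces.append("*")
--         rest = s[j + 1:]
--         k = rest.find("}")
--         s = "" if k < 0 else rest[k + 1:]
--     return "".join(pieces)
-- ===== Notes on version B (the rewrite author's own statement) =====
-- stated objective: faster
-- what changed: Replaces the per-character state-machine loop (in_replacement flag) with a scan that uses str.find to jump from each dollar sign to the matching closing brace, joining the verbatim spans with star wildcards.
import Mathlib
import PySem

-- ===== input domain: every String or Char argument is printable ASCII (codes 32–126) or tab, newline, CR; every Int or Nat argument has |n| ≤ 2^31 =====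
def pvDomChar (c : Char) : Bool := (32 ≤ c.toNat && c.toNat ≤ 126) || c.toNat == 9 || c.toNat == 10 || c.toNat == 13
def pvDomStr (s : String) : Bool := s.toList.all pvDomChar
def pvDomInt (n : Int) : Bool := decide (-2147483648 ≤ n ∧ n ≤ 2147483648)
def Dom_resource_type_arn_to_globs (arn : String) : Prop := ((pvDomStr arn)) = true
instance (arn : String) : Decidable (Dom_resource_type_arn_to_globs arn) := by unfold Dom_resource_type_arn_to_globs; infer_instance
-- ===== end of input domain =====

-- B replaces A's per-character flag loop with a find/slice scan: same result, an alternative traversal.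

-- ===== PORT A =====
-- the for-loop over the characters, state = (out, in_replacement)
def resource_type_arn_to_globs (arn : String) : String :=
  let st := arn.toList.foldl (fun (s : List Char × Bool) c =>
    if s.2 then (if c = '}' then (s.1, false) else s)
    else if c = '$' then (s.1 ++ ['*'], true)
    else (s.1 ++ [c], s.2)) ([], false)
  String.ofList st.1

-- ===== PORT B =====
-- the while-loop of Source B: state = (pieces, s); termination: s strictly shrinks past each '$'
def pvAltLoop (pieces : List (List Char)) (s : List Char) : List (List Char) :=
  let j := PySem.Chars.find s ['$']
  if _h : j < 0 then pieces ++ [s]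
  else
    let rest := PySem.List.slice s (some (j + 1)) none
    let k := PySem.Chars.find rest ['}']
    let s' := if k < 0 then [] else PySem.List.slice rest (some (k + 1)) none
    pvAltLoop (pieces ++ [PySem.List.slice s none (some j), ['*']]) s'
termination_by s.length
decreasing_by
  have hj : 0 ≤ PySem.Chars.find s ['$'] := by omega
  have hmem : ['$'] <:+: s := (PySem.Chars.find_nonneg_iff s ['$']).1 hj
  have hne : 1 ≤ s.length := by simpa using hmem.length_le
  rw [PySem.List.slice_from s (by omega)]
  split
  · simpa using hne
  · next hk =>
    rw [PySem.List.slice_from _ (by omega)]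
    simp only [List.length_drop]
    omega

def resource_type_arn_to_globs_alt (arn : String) : String :=
  String.ofList (PySem.Chars.join [] (pvAltLoop [] arn.toList))

-- ===== PRECONDITION & SPEC =====
def Spec_resource_type_arn_to_globs (arn : String) (out : String) : Prop := out = resource_type_arn_to_globs_alt arn
instance (arn : String) (out : String) : Decidable (Spec_resource_type_arn_to_globs arn out) := by unfold Spec_resource_type_arn_to_globs; infer_instance

-- ===== CLAIM (what is proved, stated in full; the proofs are below) =====
def Claim_equal_resource_type_arn_to_globs : Prop := ∀ (arn : String), Dom_resource_type_arn_to_globs arn → Spec_resource_type_arn_to_globs arn (resource_type_arn_to_globs arn)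

-- ===== LEMMAS AND PROOFS =====

-- A's state machine as a structural recursion on the remaining characters
def pvARun : List Char → Bool → List Char
  | [], _ => []
  | c :: cs, true => if c = '}' then pvARun cs false else pvARun cs true
  | c :: cs, false => if c = '$' then '*' :: pvARun cs true else c :: pvARun cs false

theorem pvFoldA (cs : List Char) : ∀ (acc : List Char) (b : Bool),
    (cs.foldl (fun (s : List Char × Bool) c =>
      if s.2 then (if c = '}' then (s.1, false) else s)
      else if c = '$' then (s.1 ++ ['*'], true)
      else (s.1 ++ [c], s.2)) (acc, b)).1 = acc ++ pvARun cs b := by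
  induction cs with
  | nil => intro acc b; simp [pvARun]
  | cons c cs ih =>
    intro acc b
    cases b with
    | true => by_cases h : c = '}' <;> simp [pvARun, h, ih]
    | false => by_cases h : c = '$' <;> simp [pvARun, h, ih]

-- find on a single-character needle: shifting the running index
theorem pvGoShift (c : Char) (t : List Char) : ∀ (k : Nat),
    PySem.Chars.find.go [c] t (k + 1) =
      if PySem.Chars.find.go [c] t k = -1 then -1 else PySem.Chars.find.go [c] t k + 1 := by
  induction t with
  | nil => intro k; simp [PySem.Chars.find.go]
  | cons a t ih =>
    intro k
    rw [PySem.Chars.find.go.eq_2, PySem.Chars.find.go.eq_2]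
    by_cases h : c = a
    · simp only [List.isPrefixOf, h, BEq.rfl, Bool.true_and, if_true]
      rw [if_neg (by omega : ¬((k : Int) = -1))]
      push_cast; omega
    · have hb : (c == a) = false := by simp only [beq_eq_false_iff_ne]; exact h
      simp only [List.isPrefixOf, hb, Bool.false_and]
      exact ih (k + 1)

-- find on a single-character needle, one cons step
theorem pvFindSingleCons (a c : Char) (t : List Char) :
    PySem.Chars.find (a :: t) [c] =
      if a = c then 0
      else if PySem.Chars.find t [c] = -1 then -1 else PySem.Chars.find t [c] + 1 := by
  show PySem.Chars.find.go [c] (a :: t) 0 = _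
  rw [PySem.Chars.find.go.eq_2]
  by_cases h : a = c
  · simp [List.isPrefixOf, h]
  · have hb : (c == a) = false := by simp only [beq_eq_false_iff_ne]; exact Ne.symm h
    simp only [List.isPrefixOf, hb, Bool.false_and, if_neg h]
    exact pvGoShift c t 0

theorem pvFindNil (c : Char) : PySem.Chars.find [] [c] = -1 := rfl

-- no '$' in s: A copies s verbatim
theorem pvNoDollar (s : List Char) (h : PySem.Chars.find s ['$'] < 0) :
    pvARun s false = s := by
  induction s with
  | nil => rfl
  | cons a t ih =>
    rw [pvFindSingleCons] at h
    by_cases ha : a = '$'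
    · rw [if_pos ha] at h; omega
    · have hle := PySem.Chars.neg_one_le_find t ['$']
      rw [if_neg ha] at h
      split at h
      · next hft => simp [pvARun, ha, ih (by omega)]
      · omega

-- 0 ≤ find s '$': A copies the prefix, emits '*', and goes into replacement mode
theorem pvSplitDollar (s : List Char) (h : 0 ≤ PySem.Chars.find s ['$']) :
    pvARun s false =
      s.take (PySem.Chars.find s ['$']).toNat ++
        '*' :: pvARun (s.drop (PySem.Chars.find s ['$'] + 1).toNat) true := by
  induction s with
  | nil => rw [pvFindNil] at h; omega
  | cons a t ih =>
    rw [pvFindSingleCons] at h ⊢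
    by_cases ha : a = '$'
    · simp [ha, pvARun]
    · have hle := PySem.Chars.neg_one_le_find t ['$']
      rw [if_neg ha] at h ⊢
      split at h
      · next hft => omega
      · next hft =>
        have h0 : 0 ≤ PySem.Chars.find t ['$'] := by omega
        rw [if_neg hft]
        have htn : (PySem.Chars.find t ['$'] + 1).toNat = (PySem.Chars.find t ['$']).toNat + 1 := by omega
        simp only [pvARun, if_neg ha]
        rw [htn, List.take_succ_cons]
        rw [show (PySem.Chars.find t ['$'] + 1 + 1).toNat = ((PySem.Chars.find t ['$']).toNat + 1) + 1 by omega]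
        rw [List.drop_succ_cons, ih h0, htn]
        simp

-- in replacement mode: skip to the first '}' (or to the end)
theorem pvRunTrue (s : List Char) :
    pvARun s true =
      if PySem.Chars.find s ['}'] < 0 then []
      else pvARun (s.drop (PySem.Chars.find s ['}'] + 1).toNat) false := by
  induction s with
  | nil => simp [pvFindNil, pvARun]
  | cons a t ih =>
    rw [pvFindSingleCons]
    by_cases ha : a = '}'
    · simp [ha, pvARun]
    · have hle := PySem.Chars.neg_one_le_find t ['}']
      rw [if_neg ha]
      simp only [pvARun, if_neg ha]
      split
      · next hft => simp [hft, ih]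
      · next hft =>
        have h0 : 0 ≤ PySem.Chars.find t ['}'] := by omega
        rw [ih, if_neg (by omega), if_neg (by omega)]
        have : (PySem.Chars.find t ['}'] + 1 + 1).toNat = (PySem.Chars.find t ['}'] + 1).toNat + 1 := by omega
        rw [this, List.drop_succ_cons]

theorem pvJoinEmpty (L : List (List Char)) : PySem.Chars.join [] L = L.flatten := by
  show List.intercalate [] L = L.flatten
  unfold List.intercalate
  induction L with
  | nil => rfl
  | cons x L ih =>
    cases L with
    | nil => simp
    | cons y t => rw [List.intersperse_cons₂]; simpa using ih

-- the loop invariant of B's while loop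
theorem pvLoopInv : ∀ (n : Nat) (s : List Char), s.length ≤ n → ∀ (pieces : List (List Char)),
    (pvAltLoop pieces s).flatten = pieces.flatten ++ pvARun s false := by
  intro n
  induction n with
  | zero =>
    intro s hs pieces
    have hs0 : s = [] := by
      cases s with
      | nil => rfl
      | cons a t => simp at hs
    subst hs0
    rw [pvAltLoop]
    simp [pvFindNil, pvARun]
  | succ n ih =>
    intro s hs pieces
    rw [pvAltLoop]
    by_cases hj : PySem.Chars.find s ['$'] < 0
    · simp only [dif_pos hj]
      simp [pvNoDollar s hj]
    · simp only [dif_neg hj]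
      have h0 : 0 ≤ PySem.Chars.find s ['$'] := by omega
      have hmem : ['$'] <:+: s := (PySem.Chars.find_nonneg_iff s ['$']).1 h0
      have hne : 1 ≤ s.length := by simpa using hmem.length_le
      have hrest : PySem.List.slice s (some (PySem.Chars.find s ['$'] + 1)) none
          = s.drop (PySem.Chars.find s ['$'] + 1).toNat :=
        PySem.List.slice_from s (by omega)
      have hsl : PySem.List.slice s none (some (PySem.Chars.find s ['$'])) =
          s.take (PySem.Chars.find s ['$']).toNat := PySem.List.slice_to s h0
      have hrlen : (s.drop (PySem.Chars.find s ['$'] + 1).toNat).length < s.length := by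
        rw [List.length_drop]; omega
      rw [hrest, hsl]
      set r := s.drop (PySem.Chars.find s ['$'] + 1).toNat with hrdef
      by_cases hk : PySem.Chars.find r ['}'] < 0
      · rw [if_pos hk, ih [] (by simp)]
        rw [pvSplitDollar s h0, pvRunTrue, ← hrdef, if_pos hk]
        simp [pvARun]
      · rw [if_neg hk]
        have hk0 : 0 ≤ PySem.Chars.find r ['}'] := by omega
        have hsr : PySem.List.slice r (some (PySem.Chars.find r ['}'] + 1)) none
            = r.drop (PySem.Chars.find r ['}'] + 1).toNat := PySem.List.slice_from r (by omega)
        rw [hsr]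
        have hslen : (r.drop (PySem.Chars.find r ['}'] + 1).toNat).length ≤ r.length := by
          rw [List.length_drop]; omega
        rw [ih _ (by omega)]
        rw [pvSplitDollar s h0, pvRunTrue, ← hrdef, if_neg hk]
        simp

-- ===== VERDICT (by name: the statement is the Claim_ definition above) =====
theorem resource_type_arn_to_globs_spec : Claim_equal_resource_type_arn_to_globs := by
  intro arn _
  unfold Spec_resource_type_arn_to_globs resource_type_arn_to_globs resource_type_arn_to_globs_alt
  rw [pvJoinEmpty, pvLoopInv arn.toList.length arn.toList le_rfl []]
  simp [pvFoldA]
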